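-- pv_equiv track=rewrite | github.com/anaolivares2712/AAT-Bingo | src/bingo.py | celdas_ocupadas_consecutivas
-- ===== SOURCE A (Python) =====
-- def celdas_ocupadas_consecutivas(carton): # En una fila no existen mas de dos celdas ocupadas consecutivas
--     cont = 0
--     for i in range(3):
--         for j in range(9):
--             if carton[i][j] != 0:
--                 cont += 1
--                 if cont > 2:
--                     return 1
--             else:
--                 cont = 0
--         cont = 0
--     return 0
-- ===== SOURCE B (Python) =====
-- def celdas_ocupadas_consecutivas(carton):
--     for i in range(3):
--         fila = carton[i]
--         if any(fila[j] != 0 and fila[j + 1] != 0 and fila[j + 2] != 0 for j in range(7)):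
--             return 1
--     return 0
-- ===== Notes on version B (the rewrite author's own statement) =====
-- stated objective: simpler
-- what changed: Replaced the running-counter scan with early return by a per-row sliding 3-window any() check: a run of >=3 nonzeros exists iff some window of 3 consecutive cells is all nonzero.
import Mathlib
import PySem

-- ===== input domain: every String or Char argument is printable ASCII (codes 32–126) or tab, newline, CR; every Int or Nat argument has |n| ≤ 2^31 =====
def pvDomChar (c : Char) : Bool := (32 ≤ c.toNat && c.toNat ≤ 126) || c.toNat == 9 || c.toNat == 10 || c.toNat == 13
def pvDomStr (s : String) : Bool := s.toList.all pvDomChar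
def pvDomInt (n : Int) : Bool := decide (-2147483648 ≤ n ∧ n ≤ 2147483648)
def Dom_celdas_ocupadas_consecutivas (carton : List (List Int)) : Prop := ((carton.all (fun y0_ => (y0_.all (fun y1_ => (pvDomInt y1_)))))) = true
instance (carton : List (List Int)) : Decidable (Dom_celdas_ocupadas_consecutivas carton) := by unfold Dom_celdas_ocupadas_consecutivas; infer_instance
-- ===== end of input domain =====

-- B replaces A's running-counter scan (with early return) by a per-row sliding 3-window any() check (objective: simpler).
-- Where Python raises IndexError (cartons lacking 3 rows of 9 cells) both ports read missing cells as 0 via getD;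
-- on every input where the Pythons return, the ports compute those same values.


-- ===== PORT A =====
-- Transliteration of A: nested loops over i in range(3), j in range(9); loop state = (cont, early-return value).
-- pvStepA is the body of the inner loop (one j-step); 'fila' is carton[i].
def pvStepA (fila : List Int) (st2 : Int × Option Int) (j : Int) : Int × Option Int :=
  match st2 with
  | (cont, some r) => (cont, some r)
  | (cont, none) =>
    if ((PySem.List.pyGet? fila j).getD 0) ≠ 0 then
      if cont + 1 > 2 then (cont + 1, some (1 : Int)) else (cont + 1, none)
    else (0, none)

def celdas_ocupadas_consecutivas (carton : List (List Int)) : Int :=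
  let final := (PySem.List.pyRange 0 3 1).foldl (fun st i =>
    match st with
    | (cont, some r) => (cont, some r)
    | (cont0, none) =>
        let inner := (PySem.List.pyRange 0 9 1).foldl
          (pvStepA ((PySem.List.pyGet? carton i).getD [])) (cont0, (none : Option Int))
        match inner with
        | (c, some r) => (c, some r)
        | (_, none) => (0, none)) ((0 : Int), (none : Option Int))
  final.2.getD 0

-- ===== PORT B =====
-- Transliteration of B: for each of the 3 rows, any() over the 7 sliding windows of 3 consecutive cells.
-- pvWin is B's 'any(fila[j] != 0 and fila[j+1] != 0 and fila[j+2] != 0 for j in range(7))'.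
def pvWin (fila : List Int) : Bool :=
  (PySem.List.pyRange 0 7 1).any (fun j =>
    decide ((PySem.List.pyGet? fila j).getD 0 ≠ 0) &&
    decide ((PySem.List.pyGet? fila (j + 1)).getD 0 ≠ 0) &&
    decide ((PySem.List.pyGet? fila (j + 2)).getD 0 ≠ 0))

def celdas_ocupadas_consecutivas_alt (carton : List (List Int)) : Int :=
  if (PySem.List.pyRange 0 3 1).any (fun i => pvWin ((PySem.List.pyGet? carton i).getD []))
  then 1 else 0

-- ===== PRECONDITION & SPEC =====
-- Pre_ states exactly the inputs on which Python A returns (no IndexError): either the carton has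
-- 3 rows of at least 9 cells, or the row-major scan meets 3 consecutive nonzero cells strictly
-- before the first missing cell it would read.
def pvRowOk (carton : List (List Int)) (i : Nat) : Prop :=
  i < carton.length ∧ 9 ≤ (carton.getD i []).length

def pvWinAt (l : List Int) (j : Nat) : Prop :=
  l.getD j 0 ≠ 0 ∧ l.getD (j+1) 0 ≠ 0 ∧ l.getD (j+2) 0 ≠ 0

def Pre_celdas_ocupadas_consecutivas (carton : List (List Int)) : Prop :=
  (∀ i < 3, pvRowOk carton i) ∨
  (∃ i < 3, (∀ i' < i, pvRowOk carton i') ∧ ¬ pvRowOk carton i ∧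
    ((∃ i' < i, ∃ j < 7, pvWinAt (carton.getD i' []) j) ∨
     (i < carton.length ∧ ∃ j < 7, j + 2 < (carton.getD i []).length ∧ pvWinAt (carton.getD i []) j)))
instance (carton : List (List Int)) : Decidable (Pre_celdas_ocupadas_consecutivas carton) := by
  unfold Pre_celdas_ocupadas_consecutivas pvRowOk pvWinAt; infer_instance

def pvWitness_celdas_ocupadas_consecutivas : List (List Int) :=
  [[0,0,0,0,0,0,0,0,0],[0,0,0,0,0,0,0,0,0],[0,0,0,0,0,0,0,0,0]]

def Spec_celdas_ocupadas_consecutivas (carton : List (List Int)) (out : Int) : Prop := out = celdas_ocupadas_consecutivas_alt carton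
instance (carton : List (List Int)) (out : Int) : Decidable (Spec_celdas_ocupadas_consecutivas carton out) := by unfold Spec_celdas_ocupadas_consecutivas; infer_instance

-- ===== CLAIM (what is proved, stated in full; the proofs are below) =====
def Claim_equal_celdas_ocupadas_consecutivas : Prop := ∀ (carton : List (List Int)), Dom_celdas_ocupadas_consecutivas carton → Pre_celdas_ocupadas_consecutivas carton → Spec_celdas_ocupadas_consecutivas carton (celdas_ocupadas_consecutivas carton)

-- ===== LEMMAS AND PROOFS =====

-- A boolean version of one inner-loop step (condition already evaluated).
def pvStepB (b : Bool) (st : Int × Option Int) : Int × Option Int :=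
  match st with
  | (cont, some r) => (cont, some r)
  | (cont, none) =>
    if b then (if cont + 1 > 2 then (cont + 1, some (1:Int)) else (cont + 1, none)) else (0, none)

theorem pvStepA_eq (fila : List Int) (st : Int × Option Int) (j : Int) :
    pvStepA fila st j = pvStepB (decide ((PySem.List.pyGet? fila j).getD 0 ≠ 0)) st := by
  unfold pvStepA pvStepB
  rcases st with ⟨c, _ | r⟩ <;> simp

-- Per-row core: A's counter scan over one row finds a run of ≥ 3 nonzeros iff some 3-window is all nonzero.
theorem pv_row (fila : List Int) :
    ((PySem.List.pyRange 0 9 1).foldl (pvStepA fila) (0, none)).2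
    = (if pvWin fila then some 1 else none) := by
  have h9 : PySem.List.pyRange 0 9 1 = [0,1,2,3,4,5,6,7,8] := by decide
  have h7 : PySem.List.pyRange 0 7 1 = [0,1,2,3,4,5,6] := by decide
  rw [h9]
  unfold pvWin
  rw [h7]
  simp only [List.foldl_cons, List.foldl_nil, List.any_cons, List.any_nil, pvStepA_eq]
  simp only [show ((0:Int)+1)=1 from by norm_num, show ((0:Int)+2)=2 from by norm_num,
      show ((1:Int)+1)=2 from by norm_num, show ((1:Int)+2)=3 from by norm_num,
      show ((2:Int)+1)=3 from by norm_num, show ((2:Int)+2)=4 from by norm_num,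
      show ((3:Int)+1)=4 from by norm_num, show ((3:Int)+2)=5 from by norm_num,
      show ((4:Int)+1)=5 from by norm_num, show ((4:Int)+2)=6 from by norm_num,
      show ((5:Int)+1)=6 from by norm_num, show ((5:Int)+2)=7 from by norm_num,
      show ((6:Int)+1)=7 from by norm_num, show ((6:Int)+2)=8 from by norm_num]
  generalize decide ((PySem.List.pyGet? fila 0).getD 0 ≠ 0) = b0, decide ((PySem.List.pyGet? fila 1).getD 0 ≠ 0) = b1, decide ((PySem.List.pyGet? fila 2).getD 0 ≠ 0) = b2, decide ((PySem.List.pyGet? fila 3).getD 0 ≠ 0) = b3, decide ((PySem.List.pyGet? fila 4).getD 0 ≠ 0) = b4, decide ((PySem.List.pyGet? fila 5).getD 0 ≠ 0) = b5, decide ((PySem.List.pyGet? fila 6).getD 0 ≠ 0) = b6, decide ((PySem.List.pyGet? fila 7).getD 0 ≠ 0) = b7, decide ((PySem.List.pyGet? fila 8).getD 0 ≠ 0) = b8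
  revert b0 b1 b2 b3 b4 b5 b6 b7 b8
  decide

-- ===== VERDICT (by name: the statement is the Claim_ definition above) =====
theorem celdas_ocupadas_consecutivas_spec : Claim_equal_celdas_ocupadas_consecutivas := by
  intro carton _ _
  unfold Spec_celdas_ocupadas_consecutivas
  have h3 : PySem.List.pyRange 0 3 1 = [0,1,2] := by decide
  unfold celdas_ocupadas_consecutivas celdas_ocupadas_consecutivas_alt
  rw [h3]
  simp only [List.foldl_cons, List.foldl_nil, List.any_cons, List.any_nil]
  have e0' := pv_row ((PySem.List.pyGet? carton (0:Int)).getD [])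
  rcases hv0 : List.foldl (pvStepA ((PySem.List.pyGet? carton (0:Int)).getD [])) ((0:Int), (none : Option Int)) (PySem.List.pyRange 0 9 1) with ⟨k0, o0⟩
  rw [hv0] at e0'
  simp only [] at e0'
  by_cases hw0 : pvWin ((PySem.List.pyGet? carton (0:Int)).getD [])
  · simp only [hw0, if_true] at e0'
    subst e0'
    simp [hw0]
  · simp only [hw0] at e0'
    subst e0'
    have e1' := pv_row ((PySem.List.pyGet? carton (1:Int)).getD [])
    rcases hv1 : List.foldl (pvStepA ((PySem.List.pyGet? carton (1:Int)).getD [])) ((0:Int), (none : Option Int)) (PySem.List.pyRange 0 9 1) with ⟨k1, o1⟩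
    rw [hv1] at e1'
    simp only [] at e1'
    by_cases hw1 : pvWin ((PySem.List.pyGet? carton (1:Int)).getD [])
    · simp only [hw1, if_true] at e1'
      subst e1'
      simp [hw0, hw1, hv1]
    · simp only [hw1] at e1'
      subst e1'
      have e2' := pv_row ((PySem.List.pyGet? carton (2:Int)).getD [])
      rcases hv2 : List.foldl (pvStepA ((PySem.List.pyGet? carton (2:Int)).getD [])) ((0:Int), (none : Option Int)) (PySem.List.pyRange 0 9 1) with ⟨k2, o2⟩
      rw [hv2] at e2'
      simp only [] at e2'
      by_cases hw2 : pvWin ((PySem.List.pyGet? carton (2:Int)).getD [])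
      · simp only [hw2, if_true] at e2'
        subst e2'
        simp [hw0, hw1, hw2, hv1, hv2]
      · simp only [hw2] at e2'
        subst e2'
        simp [hw0, hw1, hw2, hv1, hv2]
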